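-- pv_equiv track=rewrite | github.com/romartin/py-sandbox | video_namings.py | renameFromTokens
-- ===== SOURCE A (Python) =====
-- video_tokens = ['www.', 'DVD', 'DVD.Screener','DVD-Screener', 'DVDScreener', 'M1080', '760p', '1080p', 'BDR1080', 'BR-Screener', 'BRScreener', 'BR.Screener', 'BR.SCreener', 'HDTV.Screener', 'HDTV-Screener', 'HDTVScreener', 'HD.RD', 'XviD', 'MicroHD', 'HDRip', 'BRRip', 'DVDrip', 'HDR','BluRay']
--
-- def renameFromTokens(videoname:str):
--     videonamelen = len(videoname)
--     indexes = [videonamelen]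
--     try:
--         indexes.append(videoname.index('[') - 1)
--     except:
--         pass
--     try:
--         indexes.append(videoname.index('(') - 1)
--     except:
--         pass
--     for token in video_tokens:
--         try:
--             indexes.append(videoname.index(token))
--         except:
--             pass
--     index = min(indexes)
--     if index < 0:
--         index = len(videoname)
--     return videoname[0:index]
-- ===== SOURCE B (Python) =====
-- video_tokens = ['www.', 'DVD', 'DVD.Screener','DVD-Screener', 'DVDScreener', 'M1080', '760p', '1080p', 'BDR1080', 'BR-Screener', 'BRScreener', 'BR.Screener', 'BR.SCreener', 'HDTV.Screener', 'HDTV-Screener', 'HDTVScreener', 'HD.RD', 'XviD', 'MicroHD', 'HDRip', 'BRRip', 'DVDrip', 'HDR','BluRay']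
--
-- def renameFromTokens(videoname: str):
--     # Single left-to-right scan: stop at the first position that is a bracket
--     # (cut one char earlier) or starts a known token.
--     for i, c in enumerate(videoname):
--         if c in '([':
--             cut = i - 1
--             return videoname[:cut] if cut >= 0 else videoname
--         if any(videoname.startswith(t, i) for t in video_tokens):
--             return videoname[:i]
--     return videoname
-- ===== Notes on version B (the rewrite author's own statement) =====
-- stated objective: alternative
-- what changed: A runs 26 independent .index scans (brackets and every token), collects the found positions in a list and takes its min; B makes one left-to-right pass over the string and stops at the first position that is a bracket (cutting one char earlier) or starts a known token.
import Mathlib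
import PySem

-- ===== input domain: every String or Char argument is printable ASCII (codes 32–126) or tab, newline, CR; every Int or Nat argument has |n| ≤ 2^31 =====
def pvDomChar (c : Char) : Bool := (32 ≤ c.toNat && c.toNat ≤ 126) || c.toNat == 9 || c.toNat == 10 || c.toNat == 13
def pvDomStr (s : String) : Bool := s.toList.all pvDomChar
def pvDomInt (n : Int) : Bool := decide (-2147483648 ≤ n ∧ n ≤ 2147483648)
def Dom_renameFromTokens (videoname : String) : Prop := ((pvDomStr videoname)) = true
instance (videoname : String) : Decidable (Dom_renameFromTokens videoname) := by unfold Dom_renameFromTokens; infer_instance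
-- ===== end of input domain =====

-- B replaces A's 26 independent .index scans collected into a list and minimised by ONE
-- left-to-right scan that stops at the first bracket / token position (objective: alternative).

def videoTokens : List String := ["www.", "DVD", "DVD.Screener", "DVD-Screener", "DVDScreener", "M1080", "760p", "1080p", "BDR1080", "BR-Screener", "BRScreener", "BR.Screener", "BR.SCreener", "HDTV.Screener", "HDTV-Screener", "HDTVScreener", "HD.RD", "XviD", "MicroHD", "HDRip", "BRRip", "DVDrip", "HDR", "BluRay"]

-- ===== PORT A =====
-- indexes = [len] then append '['-index-1, '('-index-1 and each token's index when found
-- (each try/except around .index is ported as the corresponding 'find = -1' test)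
def buildIndexes (s : List Char) : List Int :=
  let indexes : List Int := [(s.length : Int)]
  let indexes := if PySem.Chars.find s ['['] = -1 then indexes
                 else indexes ++ [PySem.Chars.find s ['['] - 1]
  let indexes := if PySem.Chars.find s ['('] = -1 then indexes
                 else indexes ++ [PySem.Chars.find s ['('] - 1]
  videoTokens.foldl (fun acc t =>
    if PySem.Chars.find s t.toList = -1 then acc
    else acc ++ [PySem.Chars.find s t.toList]) indexes

def renameFromTokens (videoname : String) : String :=
  let s := videoname.toList
  let videonamelen : Int := (s.length : Int)
  -- index = min(indexes); indexes is never empty, so .getD 0 is only a totality guard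
  let index := (PySem.List.min? (buildIndexes s) (fun y => y)).getD 0
  let index := if index < 0 then videonamelen else index
  String.ofList (PySem.List.slice s (some 0) (some index))

-- ===== PORT B =====
-- single pass: first position that is a bracket (cut one earlier) or starts a token
def scanCut (suf : List Char) (i : Int) : Option Int :=
  match suf with
  | [] => none
  | c :: rest =>
    if c = '(' ∨ c = '[' then some (i - 1)
    else if videoTokens.any (fun t => PySem.Chars.startswith (c :: rest) t.toList) then some i
    else scanCut rest (i + 1)

def renameFromTokens_alt (videoname : String) : String :=
  let s := videoname.toList
  match scanCut s 0 with
  | none => videoname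
  | some cut => if cut < 0 then videoname else String.ofList (s.take cut.toNat)

-- ===== PRECONDITION & SPEC =====
def Spec_renameFromTokens (videoname : String) (out : String) : Prop := out = renameFromTokens_alt videoname
instance (videoname : String) (out : String) : Decidable (Spec_renameFromTokens videoname out) := by unfold Spec_renameFromTokens; infer_instance

-- ===== CLAIM (what is proved, stated in full; the proofs are below) =====
def Claim_equal_renameFromTokens : Prop := ∀ (videoname : String), Dom_renameFromTokens videoname → Spec_renameFromTokens videoname (renameFromTokens videoname)

-- ===== LEMMAS AND PROOFS =====

-- 'there is a hit at this suffix': a bracket, or a token starting here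
def hitHere (suf : List Char) : Bool :=
  match suf with
  | [] => false
  | c :: rest => decide (c = '(' ∨ c = '[') ||
      videoTokens.any (fun t => PySem.Chars.startswith (c :: rest) t.toList)

lemma scanCut_eq_none (suf : List Char) (i : Int)
    (h : ∀ k, hitHere (suf.drop k) = false) : scanCut suf i = none := by
  induction suf generalizing i with
  | nil => rfl
  | cons c rest ih =>
    have h0 := h 0
    simp only [List.drop_zero, hitHere, Bool.or_eq_false_iff, decide_eq_false_iff_not] at h0
    have hstep : scanCut (c :: rest) i = scanCut rest (i + 1) := by
      simp [scanCut, h0.1, h0.2]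
    rw [hstep]
    exact ih (i + 1) (fun k => by simpa using h (k + 1))

lemma scanCut_eq_some (suf : List Char) (i : Int) (m : Nat)
    (hm : hitHere (suf.drop m) = true)
    (hmin : ∀ j < m, hitHere (suf.drop j) = false) :
    scanCut suf i =
      some (if (suf.drop m).headI = '(' ∨ (suf.drop m).headI = '['
            then i + m - 1 else i + m) := by
  induction suf generalizing i m with
  | nil => simp [hitHere] at hm
  | cons c rest ih =>
    cases m with
    | zero =>
      simp only [List.drop_zero, List.headI_cons] at hm ⊢
      simp only [hitHere, Bool.or_eq_true, decide_eq_true_eq] at hm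
      by_cases hb : c = '(' ∨ c = '['
      · simp [scanCut, hb]
      · rcases hm with hm | hm
        · exact absurd hm hb
        · simp [scanCut, hb, hm]
    | succ m =>
      have h0 := hmin 0 (Nat.succ_pos m)
      simp only [List.drop_zero, hitHere, Bool.or_eq_false_iff, decide_eq_false_iff_not] at h0
      have hstep : scanCut (c :: rest) i = scanCut rest (i + 1) := by
        simp [scanCut, h0.1, h0.2]
      rw [hstep, List.drop_succ_cons,
        ih (i + 1) m (by simpa using hm)
          (fun j hj => by simpa using hmin (j + 1) (by omega))]
      congr 1
      split_ifs <;> push_cast <;> ring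

lemma tokens_ne_nil : ∀ t ∈ videoTokens, t.toList ≠ [] := by decide

lemma hit_of_token {t : String} (ht : t ∈ videoTokens) {suf : List Char}
    (hp : t.toList <+: suf) : hitHere suf = true := by
  cases suf with
  | nil => exact absurd (List.prefix_nil.mp hp) (tokens_ne_nil t ht)
  | cons c rest =>
    simp only [hitHere, Bool.or_eq_true, List.any_eq_true]
    exact Or.inr ⟨t, ht, (PySem.Chars.startswith_iff _ _).mpr hp⟩

lemma head_of_single_prefix {b c : Char} {rest : List Char}
    (hp : [b] <+: c :: rest) : b = c := by
  rcases hp with ⟨tl, htl⟩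
  simpa using congrArg List.head? htl

lemma hit_of_bracket {b : Char} (hb : b = '(' ∨ b = '[') {suf : List Char}
    (hp : [b] <+: suf) : hitHere suf = true := by
  cases suf with
  | nil => simp at hp
  | cons c rest =>
    have hc : c = b := (head_of_single_prefix hp).symm
    simp [hitHere, hc, hb]

-- find l sub ≠ -1 : the Nat position with its two properties
lemma find_facts {l sub : List Char} (h : PySem.Chars.find l sub ≠ -1) :
    PySem.Chars.find l sub = ((PySem.Chars.find l sub).toNat : Int) ∧
    sub <+: l.drop (PySem.Chars.find l sub).toNat ∧
    ∀ i < (PySem.Chars.find l sub).toNat, ¬ sub <+: l.drop i := by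
  have hinf : sub <:+: l := by
    by_contra hc
    exact h ((PySem.Chars.find_eq_neg_one_iff l sub).mpr hc)
  have hnn : 0 ≤ PySem.Chars.find l sub := (PySem.Chars.find_nonneg_iff l sub).mpr hinf
  exact ⟨(Int.toNat_of_nonneg hnn).symm, PySem.Chars.find_spec hnn⟩

lemma find_eq_neg_one_of_no_hit {l sub : List Char}
    (hhit : ∀ k : Nat, ¬ sub <+: l.drop k) : PySem.Chars.find l sub = -1 := by
  rw [PySem.Chars.find_eq_neg_one_iff]
  intro hinf
  rcases (PySem.Chars.exists_prefix_drop_iff_isIn sub l).mpr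
    ((PySem.Chars.isIn_iff_infix sub l).mpr hinf) with ⟨j, hj⟩
  exact hhit j hj

lemma find_eq_of_first {l sub : List Char} {m : Nat} (hocc : sub <+: l.drop m)
    (hfirst : ∀ j : Nat, sub <+: l.drop j → m ≤ j) :
    PySem.Chars.find l sub = (m : Int) := by
  have hne : PySem.Chars.find l sub ≠ -1 := by
    rw [Ne, PySem.Chars.find_eq_neg_one_iff, not_not]
    exact (PySem.Chars.isIn_iff_infix sub l).mp
      ((PySem.Chars.exists_prefix_drop_iff_isIn sub l).mp ⟨m, hocc⟩)
  obtain ⟨heq, hpre, hmin⟩ := find_facts hne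
  have h1 : m ≤ (PySem.Chars.find l sub).toNat := hfirst _ hpre
  have h2 : ¬ m < (PySem.Chars.find l sub).toNat := fun hlt => hmin m hlt hocc
  omega

lemma foldl_tokens_id {l : List Char} {ts : List String}
    (h : ∀ t ∈ ts, PySem.Chars.find l t.toList = -1) (acc : List Int) :
    ts.foldl (fun acc t => if PySem.Chars.find l t.toList = -1 then acc
      else acc ++ [PySem.Chars.find l t.toList]) acc = acc := by
  induction ts generalizing acc with
  | nil => rfl
  | cons t ts ih =>
    simp only [List.foldl_cons, if_pos (h t (by simp))]
    exact ih (fun t' ht' => h t' (by simp [ht'])) acc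

-- membership description of A's indexes list
lemma mem_buildIndexes {l : List Char} {y : Int} :
    y ∈ buildIndexes l ↔
      y = (l.length : Int) ∨
      (¬ PySem.Chars.find l ['['] = -1 ∧ y = PySem.Chars.find l ['['] - 1) ∨
      (¬ PySem.Chars.find l ['('] = -1 ∧ y = PySem.Chars.find l ['('] - 1) ∨
      (∃ t, (t ∈ videoTokens ∧ ¬ PySem.Chars.find l t.toList = -1) ∧
        PySem.Chars.find l t.toList = y) := by
  unfold buildIndexes
  rw [show (fun (acc : List Int) (t : String) =>
        if PySem.Chars.find l t.toList = -1 then acc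
        else acc ++ [PySem.Chars.find l t.toList]) =
      (fun acc t => if (fun t : String => decide ¬ (PySem.Chars.find l t.toList = -1)) t = true
        then acc ++ [(fun t : String => PySem.Chars.find l t.toList) t] else acc) by
    funext acc t; by_cases h : PySem.Chars.find l t.toList = -1 <;> simp [h]]
  rw [PySem.List.foldl_append_if]
  by_cases h1 : PySem.Chars.find l ['['] = -1 <;>
    by_cases h2 : PySem.Chars.find l ['('] = -1 <;>
      simp [h1, h2, List.mem_map, List.mem_filter]

lemma buildIndexes_ne_nil (l : List Char) : buildIndexes l ≠ [] := by
  intro h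
  have : (l.length : Int) ∈ buildIndexes l := mem_buildIndexes.mpr (Or.inl rfl)
  simp [h] at this

-- the minimum A takes, as a plain value
lemma minIndexes_eq {l : List Char} {M : Int}
    (hmem : M ∈ buildIndexes l) (hle : ∀ y ∈ buildIndexes l, M ≤ y) :
    (PySem.List.min? (buildIndexes l) (fun y => y)).getD 0 = M := by
  cases hmin : PySem.List.min? (buildIndexes l) (fun y => y) with
  | none => exact absurd ((PySem.List.min?_eq_none_iff _ _).mp hmin) (buildIndexes_ne_nil l)
  | some m =>
    have h1 : m ≤ M := PySem.List.min?_isMin hmin M hmem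
    have h2 : M ≤ m := hle m (PySem.List.min?_mem hmin)
    simpa using le_antisymm h1 h2

-- ===== VERDICT (by name: the statement is the Claim_ definition above) =====
theorem renameFromTokens_spec : Claim_equal_renameFromTokens := by
  intro videoname _
  unfold Spec_renameFromTokens renameFromTokens renameFromTokens_alt
  set l := videoname.toList with hl
  show String.ofList (PySem.List.slice l (some 0)
        (some (if ((PySem.List.min? (buildIndexes l) (fun y => y)).getD 0) < 0
               then (l.length : Int)
               else (PySem.List.min? (buildIndexes l) (fun y => y)).getD 0))) =
      (match scanCut l 0 with
       | none => videoname
       | some cut => if cut < 0 then videoname else String.ofList (l.take cut.toNat))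
  by_cases hex : ∃ m, hitHere (l.drop m) = true
  · -- there is a hit; take the first one
    classical
    obtain ⟨m, hm, hmin⟩ :
        ∃ m, hitHere (l.drop m) = true ∧ ∀ j < m, hitHere (l.drop j) = false := by
      exact ⟨Nat.find hex, Nat.find_spec hex,
        fun j hj => by simpa using Nat.find_min hex hj⟩
    have hmlt : m < l.length := by
      by_contra hge
      rw [List.drop_eq_nil_of_le (by omega)] at hm
      simp [hitHere] at hm
    have hge_of_hit : ∀ j, hitHere (l.drop j) = true → m ≤ j := by
      intro j hj
      by_contra hlt
      exact absurd hj (by simp [hmin j (by omega)])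
    obtain ⟨c, rest, hdrop⟩ : ∃ c rest, l.drop m = c :: rest := by
      cases hd : l.drop m with
      | nil => rw [hd] at hm; simp [hitHere] at hm
      | cons c rest => exact ⟨c, rest, rfl⟩
    by_cases hb : c = '(' ∨ c = '['
    · -- the first hit is a bracket: both sides cut at m - 1
      have hscan : scanCut l 0 = some ((m : Int) - 1) := by
        rw [scanCut_eq_some l 0 m hm hmin, hdrop]
        simp only [List.headI_cons]
        rw [if_pos hb]
        norm_num
      have hle : ∀ y ∈ buildIndexes l, (m : Int) - 1 ≤ y := by
        intro y hy
        rcases mem_buildIndexes.mp hy with hy | ⟨hne, hy⟩ | ⟨hne, hy⟩ | ⟨t, ⟨ht, hne⟩, hy⟩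
        · omega
        · obtain ⟨heq, hpre, _⟩ := find_facts hne
          have hj := hge_of_hit _ (hit_of_bracket (Or.inr rfl) hpre)
          omega
        · obtain ⟨heq, hpre, _⟩ := find_facts hne
          have hj := hge_of_hit _ (hit_of_bracket (Or.inl rfl) hpre)
          omega
        · obtain ⟨heq, hpre, _⟩ := find_facts hne
          have hj := hge_of_hit _ (hit_of_token ht hpre)
          omega
      have hmem : (m : Int) - 1 ∈ buildIndexes l := by
        have hocc : [c] <+: l.drop m := by rw [hdrop]; exact ⟨rest, rfl⟩
        have hfind : PySem.Chars.find l [c] = (m : Int) :=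
          find_eq_of_first hocc
            (fun j hp => hge_of_hit j (hit_of_bracket hb hp))
        rcases hb with hc | hc
        · exact mem_buildIndexes.mpr (Or.inr (Or.inr (Or.inl
            ⟨by rw [← hc, hfind]; omega, by rw [← hc, hfind]⟩)))
        · exact mem_buildIndexes.mpr (Or.inr (Or.inl
            ⟨by rw [← hc, hfind]; omega, by rw [← hc, hfind]⟩))
      rw [minIndexes_eq hmem hle, hscan]
      show String.ofList (PySem.List.slice l (some 0)
            (some (if (m : Int) - 1 < 0 then (l.length : Int) else (m : Int) - 1))) =
          if (m : Int) - 1 < 0 then videoname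
          else String.ofList (l.take ((m : Int) - 1).toNat)
      by_cases hm0 : (m : Int) - 1 < 0
      · rw [if_pos hm0, if_pos hm0,
          PySem.List.slice_zero_start, PySem.List.slice_to l (Int.natCast_nonneg _),
          Int.toNat_natCast, List.take_length, hl, String.ofList_toList]
      · rw [if_neg hm0, if_neg hm0,
          PySem.List.slice_zero_start, PySem.List.slice_to l (by omega)]
    · -- the first hit starts a token: both sides cut at m
      have hscan : scanCut l 0 = some (m : Int) := by
        rw [scanCut_eq_some l 0 m hm hmin, hdrop]
        simp only [List.headI_cons]
        rw [if_neg hb]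
        norm_num
      obtain ⟨t0, ht0, hp0⟩ :
          ∃ t ∈ videoTokens, t.toList <+: l.drop m := by
        rw [hdrop] at hm
        simp only [hitHere, Bool.or_eq_true, decide_eq_true_eq, List.any_eq_true] at hm
        rcases hm with hm | ⟨t, ht, hst⟩
        · exact absurd hm hb
        · exact ⟨t, ht, by rw [hdrop]; exact (PySem.Chars.startswith_iff _ _).mp hst⟩
      have hle : ∀ y ∈ buildIndexes l, (m : Int) ≤ y := by
        intro y hy
        rcases mem_buildIndexes.mp hy with hy | ⟨hne, hy⟩ | ⟨hne, hy⟩ | ⟨t, ⟨ht, hne⟩, hy⟩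
        · omega
        · obtain ⟨heq, hpre, _⟩ := find_facts hne
          have hj := hge_of_hit _ (hit_of_bracket (Or.inr rfl) hpre)
          have hne' : (PySem.Chars.find l ['[']).toNat ≠ m := by
            intro hjm
            rw [hjm, hdrop] at hpre
            exact hb (Or.inr (head_of_single_prefix hpre).symm)
          omega
        · obtain ⟨heq, hpre, _⟩ := find_facts hne
          have hj := hge_of_hit _ (hit_of_bracket (Or.inl rfl) hpre)
          have hne' : (PySem.Chars.find l ['(']).toNat ≠ m := by
            intro hjm
            rw [hjm, hdrop] at hpre
            exact hb (Or.inl (head_of_single_prefix hpre).symm)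
          omega
        · obtain ⟨heq, hpre, _⟩ := find_facts hne
          have hj := hge_of_hit _ (hit_of_token ht hpre)
          omega
      have hmem : (m : Int) ∈ buildIndexes l := by
        have hfind : PySem.Chars.find l t0.toList = (m : Int) :=
          find_eq_of_first hp0 (fun j hp => hge_of_hit j (hit_of_token ht0 hp))
        exact mem_buildIndexes.mpr (Or.inr (Or.inr (Or.inr
          ⟨t0, ⟨ht0, by rw [hfind]; omega⟩, hfind⟩)))
      rw [minIndexes_eq hmem hle, hscan]
      show String.ofList (PySem.List.slice l (some 0)
            (some (if (m : Int) < 0 then (l.length : Int) else (m : Int)))) =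
          if (m : Int) < 0 then videoname else String.ofList (l.take ((m : Int)).toNat)
      rw [if_neg (by omega), if_neg (by omega),
        PySem.List.slice_zero_start, PySem.List.slice_to l (by omega)]
  · -- no hit anywhere: A collects nothing but the length, B scans to the end
    have hex' : ∀ k, hitHere (l.drop k) = false := by
      intro k
      by_contra h
      exact hex ⟨k, by simpa using h⟩
    rw [scanCut_eq_none l 0 hex']
    have hbr : ∀ b : Char, b = '(' ∨ b = '[' → PySem.Chars.find l [b] = -1 := by
      intro b hb
      exact find_eq_neg_one_of_no_hit (fun k hp => by
        have := hit_of_bracket hb hp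
        simp [hex' k] at this)
    have htk : ∀ t ∈ videoTokens, PySem.Chars.find l t.toList = -1 := by
      intro t ht
      exact find_eq_neg_one_of_no_hit (fun k hp => by
        have := hit_of_token ht hp
        simp [hex' k] at this)
    have hbuild : buildIndexes l = [(l.length : Int)] := by
      unfold buildIndexes
      simp only [hbr '[' (Or.inr rfl), hbr '(' (Or.inl rfl), if_true]
      exact foldl_tokens_id htk _
    rw [hbuild, PySem.List.min?_id_cons]
    show String.ofList (PySem.List.slice l (some 0)
          (some (if (l.length : Int) < 0 then (l.length : Int) else (l.length : Int)))) =
        videoname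
    rw [if_neg (by omega),
      PySem.List.slice_zero_start, PySem.List.slice_to l (Int.natCast_nonneg _),
      Int.toNat_natCast, List.take_length, hl, String.ofList_toList]
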